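-- pv_equiv track=rewrite | github.com/Velamj/brainctl | src/agentmemory/update.py | _parse_pip_show
-- ===== SOURCE A (Python) =====
-- from typing import Any, Dict, List, Optional, Tuple
--
-- def _parse_pip_show(output: str) -> Tuple[Optional[str], Optional[str]]:
--     """Pull (location, editable_location) out of `pip show` output."""
--     location: Optional[str] = None
--     editable: Optional[str] = None
--     for line in output.splitlines():
--         if line.startswith("Location:"):
--             location = line.split(":", 1)[1].strip()
--         elif line.startswith("Editable project location:"):
--             editable = line.split(":", 1)[1].strip()
--     return location, editable
-- ===== SOURCE B (Python) =====
-- from typing import Optional, Tuple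
--
-- def _parse_pip_show(output: str) -> Tuple[Optional[str], Optional[str]]:
--     """Pull (location, editable_location) out of `pip show` output."""
--     fields = {}
--     for line in output.splitlines():
--         if ":" in line:
--             key, value = line.split(":", 1)
--             fields[key] = value.strip()
--     return fields.get("Location"), fields.get("Editable project location")
-- ===== Notes on version B (the rewrite author's own statement) =====
-- stated objective: simpler
-- what changed: B replaces the two field-specific startswith branches inside the loop with a generic key/value table built in one pass over the lines, followed by two dictionary lookups outside the loop.
import Mathlib
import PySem

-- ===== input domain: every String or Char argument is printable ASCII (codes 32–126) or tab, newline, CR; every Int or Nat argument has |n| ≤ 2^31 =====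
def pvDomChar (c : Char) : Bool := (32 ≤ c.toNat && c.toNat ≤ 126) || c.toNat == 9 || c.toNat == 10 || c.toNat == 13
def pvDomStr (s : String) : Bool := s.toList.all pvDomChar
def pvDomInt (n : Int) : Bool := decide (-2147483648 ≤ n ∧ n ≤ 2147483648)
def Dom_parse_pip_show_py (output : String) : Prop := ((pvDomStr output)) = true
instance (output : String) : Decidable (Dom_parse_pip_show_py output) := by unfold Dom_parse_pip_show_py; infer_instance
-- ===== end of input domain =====

-- B builds a generic key→value table of all `pip show` fields in one pass, then
-- looks up the two fields once outside the loop (simpler decomposition; same cost).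


-- ===== PORT A =====
-- literal port of A: fold over splitlines, two startswith branches; line.split(":", 1)[1]
-- is ported with pyGet?; the .getD "" default is never used (startswith guarantees index 1 exists).
def parse_pip_show_py (output : String) : Option String × Option String :=
  (PySem.Str.splitlines output).foldl
    (fun st line =>
      if PySem.Str.startswith line "Location:" then
        (some (PySem.Str.strip ((PySem.List.pyGet? ((PySem.Str.splitMax? line ":" 1).getD []) 1).getD "")), st.2)
      else if PySem.Str.startswith line "Editable project location:" then
        (st.1, some (PySem.Str.strip ((PySem.List.pyGet? ((PySem.Str.splitMax? line ":" 1).getD []) 1).getD "")))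
      else st)
    (none, none)

-- ===== PORT B =====
-- literal port of B: generic dict-building loop over the lines, two lookups afterwards.
-- `key, value = line.split(":", 1)` is ported as the two-element match; when ":" is in the
-- line the split has exactly two pieces, so the `_ => d` fallthrough is never taken.
def parse_pip_show_py_alt (output : String) : Option String × Option String :=
  let d : PySem.Dict String String :=
    (PySem.Str.splitlines output).foldl
      (fun d line =>
        if PySem.Str.isIn ":" line then
          match (PySem.Str.splitMax? line ":" 1).getD [] with
          | key :: value :: _ => d.insert key (PySem.Str.strip value)
          | _ => d
        else d)
      PySem.Dict.empty
  (d.get? "Location", d.get? "Editable project location")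

-- ===== PRECONDITION & SPEC =====
def Spec_parse_pip_show_py (output : String) (out : Option String × Option String) : Prop := out = parse_pip_show_py_alt output
instance (output : String) (out : Option String × Option String) : Decidable (Spec_parse_pip_show_py output out) := by unfold Spec_parse_pip_show_py; infer_instance

-- ===== CLAIM (what is proved, stated in full; the proofs are below) =====
def Claim_equal_parse_pip_show_py : Prop := ∀ (output : String), Dom_parse_pip_show_py output → Spec_parse_pip_show_py output (parse_pip_show_py output)

-- ===== LEMMAS AND PROOFS =====

-- the predicate "is not a colon", kept as a named constant so rewrites stay syntactic
def pvNC : Char → Bool := fun c => c ≠ ':'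

theorem pv_go_zero (fuel : Nat) (l cur : List Char) (acc : List (List Char)) :
    PySem.Chars.splitOnMax.go [':'] fuel 0 l cur acc = ((cur.reverse ++ l) :: acc).reverse := by
  cases fuel with
  | zero => rfl
  | succ n => cases l with
    | nil => simp [PySem.Chars.splitOnMax.go]
    | cons c rest => simp [PySem.Chars.splitOnMax.go]
theorem pv_go_one (l : List Char) : ∀ (fuel : Nat) (cur : List Char) (acc : List (List Char)),
    l.length ≤ fuel →
    PySem.Chars.splitOnMax.go [':'] fuel 1 l cur acc =
      if ':' ∈ l then
        acc.reverse ++ [cur.reverse ++ l.takeWhile pvNC, (l.dropWhile pvNC).tail]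
      else acc.reverse ++ [cur.reverse ++ l] := by
  induction l with
  | nil =>
    intro fuel cur acc _
    cases fuel <;> simp [PySem.Chars.splitOnMax.go]
  | cons c rest ih =>
    intro fuel cur acc hf
    cases fuel with
    | zero => simp at hf
    | succ n =>
      by_cases hc : c = ':'
      · subst hc
        have hpre : List.isPrefixOf [':'] (':' :: rest) = true := by
          simp [List.isPrefixOf]
        simp only [PySem.Chars.splitOnMax.go, hpre]
        rw [pv_go_zero]
        simp [List.takeWhile, List.dropWhile, pvNC]
      · have hpre : List.isPrefixOf [':'] (c :: rest) = false := by
          simp [List.isPrefixOf]; exact fun h => hc h.symm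
        simp only [PySem.Chars.splitOnMax.go, hpre]
        rw [ih n (c :: cur) acc (by simpa using Nat.le_of_succ_le_succ hf)]
        by_cases hm : ':' ∈ rest
        · have : ':' ∈ c :: rest := List.mem_cons_of_mem _ hm
          simp [hm, this, List.takeWhile, List.dropWhile, pvNC, hc]
        · have : ':' ∉ c :: rest := by simp [Ne.symm hc, hm]
          simp [hm, this]
theorem pv_split_colon (l : List Char) :
    PySem.Chars.splitOnMax l [':'] 1 =
      if ':' ∈ l then [l.takeWhile pvNC, (l.dropWhile pvNC).tail] else [l] := by
  show PySem.Chars.splitOnMax.go [':'] (l.length + 1) 1 l [] [] = _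
  rw [pv_go_one l (l.length + 1) [] [] (Nat.le_succ _)]
  split <;> simp
theorem pv_isIn_colon (line : String) : PySem.Str.isIn ":" line = true ↔ ':' ∈ line.toList := by
  rw [PySem.Str.isIn_iff_infix]
  exact List.singleton_infix_iff ':' line.toList
theorem pv_tw_dw (key rest : List Char) (hk : ':' ∉ key) :
    (key ++ ':' :: rest).takeWhile pvNC = key ∧ (key ++ ':' :: rest).dropWhile pvNC = ':' :: rest := by
  induction key with
  | nil => simp [pvNC]
  | cons a ks ih =>
    have ha : a ≠ ':' := by intro h; exact hk (by simp [h])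
    have hks : ':' ∉ ks := fun h => hk (List.mem_cons_of_mem _ h)
    obtain ⟨h1, h2⟩ := ih hks
    simp only [List.cons_append, List.takeWhile_cons, List.dropWhile_cons]
    simp [pvNC, ha, h1, h2]

theorem pv_dw_head (l : List Char) (h : ':' ∈ l) :
    l.dropWhile pvNC = ':' :: (l.dropWhile pvNC).tail := by
  induction l with
  | nil => cases h
  | cons a xs ih =>
    by_cases ha : a = ':'
    · subst ha; simp [pvNC]
    · have hm : ':' ∈ xs := by
        rcases List.mem_cons.mp h with h' | h'
        · exact absurd h'.symm ha
        · exact h'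
      simpa [List.dropWhile, pvNC, ha] using ih hm

theorem pv_startswith_iff (l key : List Char) (hk : ':' ∉ key) :
    PySem.Chars.startswith l (key ++ [':']) = true ↔
      ':' ∈ l ∧ l.takeWhile pvNC = key := by
  constructor
  · intro h
    rw [PySem.Chars.startswith_iff] at h
    obtain ⟨rest, hrest⟩ := h
    have hl : l = key ++ ':' :: rest := by simpa using hrest.symm
    obtain ⟨h1, _⟩ := pv_tw_dw key rest hk
    subst hl
    exact ⟨by simp, h1⟩
  · rintro ⟨hmem, htw⟩
    rw [PySem.Chars.startswith_iff]
    refine ⟨(l.dropWhile pvNC).tail, ?_⟩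
    conv_rhs => rw [← List.takeWhile_append_dropWhile (p := pvNC) (l := l)]
    rw [htw, pv_dw_head l hmem]
    simp

theorem pv_splitMax_eval (line : String) (h : ':' ∈ line.toList) :
    (PySem.Str.splitMax? line ":" 1).getD [] =
      [String.ofList (line.toList.takeWhile pvNC),
       String.ofList ((line.toList.dropWhile pvNC).tail)] := by
  simp [PySem.Str.splitMax?, PySem.Chars.splitMax?, pv_split_colon, h]


theorem pv_step (line : String) (d : PySem.Dict String String) :
    (if PySem.Str.startswith line "Location:" then
        (some (PySem.Str.strip ((PySem.List.pyGet? ((PySem.Str.splitMax? line ":" 1).getD []) 1).getD "")), d.get? "Editable project location")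
     else if PySem.Str.startswith line "Editable project location:" then
        (d.get? "Location", some (PySem.Str.strip ((PySem.List.pyGet? ((PySem.Str.splitMax? line ":" 1).getD []) 1).getD "")))
     else (d.get? "Location", d.get? "Editable project location"))
    = (((if PySem.Str.isIn ":" line then
          match (PySem.Str.splitMax? line ":" 1).getD [] with
          | key :: value :: _ => d.insert key (PySem.Str.strip value)
          | _ => d
        else d) : PySem.Dict String String).get? "Location",
       ((if PySem.Str.isIn ":" line then
          match (PySem.Str.splitMax? line ":" 1).getD [] with
          | key :: value :: _ => d.insert key (PySem.Str.strip value)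
          | _ => d
        else d) : PySem.Dict String String).get? "Editable project location") := by
  have eL : ("Location:" : String).toList = "Location".toList ++ [':'] := by decide
  have eE : ("Editable project location:" : String).toList = "Editable project location".toList ++ [':'] := by decide
  by_cases hin : ':' ∈ line.toList
  · have hIn : PySem.Str.isIn ":" line = true := (pv_isIn_colon line).mpr hin
    have hget : PySem.List.pyGet?
        [String.ofList (line.toList.takeWhile pvNC),
         String.ofList ((line.toList.dropWhile pvNC).tail)] 1
        = some (String.ofList ((line.toList.dropWhile pvNC).tail)) := by
      simp [PySem.List.pyGet?, PySem.List.pyIdx?]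
    have hm : (match [String.ofList (line.toList.takeWhile pvNC),
                      String.ofList ((line.toList.dropWhile pvNC).tail)] with
          | key :: value :: _ => d.insert key (PySem.Str.strip value)
          | _ => d)
        = d.insert (String.ofList (line.toList.takeWhile pvNC))
            (PySem.Str.strip (String.ofList ((line.toList.dropWhile pvNC).tail))) := rfl
    by_cases hkL : line.toList.takeWhile pvNC = "Location".toList
    · have hL : PySem.Str.startswith line "Location:" = true := by
        rw [PySem.Str.startswith_eq, eL]
        exact (pv_startswith_iff line.toList _ (by decide)).mpr ⟨hin, hkL⟩
      have hkey : String.ofList (line.toList.takeWhile pvNC) = "Location" := by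
        rw [hkL]; rfl
      rw [hL, hIn, pv_splitMax_eval line hin, hget, hm, hkey]
      simp only [reduceIte, Option.getD_some]
      rw [PySem.Dict.get?_insert_self,
          PySem.Dict.get?_insert_of_ne d _ (by decide : ("Editable project location" : String) ≠ "Location")]
    · by_cases hkE : line.toList.takeWhile pvNC = "Editable project location".toList
      · have hL : PySem.Str.startswith line "Location:" = false := by
          rw [PySem.Str.startswith_eq, eL]
          exact Bool.eq_false_iff.mpr (fun h => hkL ((pv_startswith_iff line.toList _ (by decide)).mp h).2)
        have hE : PySem.Str.startswith line "Editable project location:" = true := by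
          rw [PySem.Str.startswith_eq, eE]
          exact (pv_startswith_iff line.toList _ (by decide)).mpr ⟨hin, hkE⟩
        have hkey : String.ofList (line.toList.takeWhile pvNC) = "Editable project location" := by
          rw [hkE]; rfl
        rw [hL, hE, hIn, pv_splitMax_eval line hin, hget, hm, hkey]
        simp only [reduceIte, Bool.false_eq_true, Option.getD_some]
        rw [PySem.Dict.get?_insert_self,
            PySem.Dict.get?_insert_of_ne d _ (by decide : ("Location" : String) ≠ "Editable project location")]
      · have hL : PySem.Str.startswith line "Location:" = false := by
          rw [PySem.Str.startswith_eq, eL]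
          exact Bool.eq_false_iff.mpr (fun h => hkL ((pv_startswith_iff line.toList _ (by decide)).mp h).2)
        have hE : PySem.Str.startswith line "Editable project location:" = false := by
          rw [PySem.Str.startswith_eq, eE]
          exact Bool.eq_false_iff.mpr (fun h => hkE ((pv_startswith_iff line.toList _ (by decide)).mp h).2)
        have hne1 : ("Location" : String) ≠ String.ofList (line.toList.takeWhile pvNC) := by
          intro h
          apply hkL
          have h2 := congrArg String.toList h.symm
          rwa [String.toList_ofList] at h2
        have hne2 : ("Editable project location" : String) ≠ String.ofList (line.toList.takeWhile pvNC) := by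
          intro h
          apply hkE
          have h2 := congrArg String.toList h.symm
          rwa [String.toList_ofList] at h2
        rw [hL, hE, hIn, pv_splitMax_eval line hin, hm]
        simp only [reduceIte, Bool.false_eq_true]
        rw [PySem.Dict.get?_insert_of_ne d _ hne1, PySem.Dict.get?_insert_of_ne d _ hne2]
  · have hIn : PySem.Str.isIn ":" line = false :=
      Bool.eq_false_iff.mpr (fun h => hin ((pv_isIn_colon line).mp h))
    have hL : PySem.Str.startswith line "Location:" = false := by
      rw [PySem.Str.startswith_eq, eL]
      exact Bool.eq_false_iff.mpr (fun h => hin ((pv_startswith_iff line.toList _ (by decide)).mp h).1)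
    have hE : PySem.Str.startswith line "Editable project location:" = false := by
      rw [PySem.Str.startswith_eq, eE]
      exact Bool.eq_false_iff.mpr (fun h => hin ((pv_startswith_iff line.toList _ (by decide)).mp h).1)
    rw [hL, hE, hIn]
    simp only [Bool.false_eq_true, if_false]

-- the two folds agree from any dict-shaped start
theorem pv_loop (lines : List String) : ∀ (d : PySem.Dict String String),
    lines.foldl
      (fun st line =>
        if PySem.Str.startswith line "Location:" then
          (some (PySem.Str.strip ((PySem.List.pyGet? ((PySem.Str.splitMax? line ":" 1).getD []) 1).getD "")), st.2)
        else if PySem.Str.startswith line "Editable project location:" then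
          (st.1, some (PySem.Str.strip ((PySem.List.pyGet? ((PySem.Str.splitMax? line ":" 1).getD []) 1).getD "")))
        else st)
      (d.get? "Location", d.get? "Editable project location")
    = ((lines.foldl
        (fun d line =>
          if PySem.Str.isIn ":" line then
            match (PySem.Str.splitMax? line ":" 1).getD [] with
            | key :: value :: _ => d.insert key (PySem.Str.strip value)
            | _ => d
          else d) d : PySem.Dict String String).get? "Location",
       (lines.foldl
        (fun d line =>
          if PySem.Str.isIn ":" line then
            match (PySem.Str.splitMax? line ":" 1).getD [] with
            | key :: value :: _ => d.insert key (PySem.Str.strip value)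
            | _ => d
          else d) d : PySem.Dict String String).get? "Editable project location") := by
  induction lines with
  | nil => intro d; simp
  | cons line rest ih =>
    intro d
    simp only [List.foldl_cons]
    rw [pv_step line d]
    exact ih _

-- ===== VERDICT (by name: the statement is the Claim_ definition above) =====
theorem parse_pip_show_py_spec : Claim_equal_parse_pip_show_py := by
  intro output _
  unfold Spec_parse_pip_show_py parse_pip_show_py parse_pip_show_py_alt
  have h := pv_loop (PySem.Str.splitlines output) PySem.Dict.empty
  simpa [PySem.Dict.get?_empty] using h
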